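-- pv_equiv track=rewrite | github.com/gentle1999/MolOP | src/molop/io/logic/QM_parsers/G16LogFileParser.py | _split_section_frames
-- ===== SOURCE A (Python) =====
-- SPLIT_PATTERN = "Input orientation:"
--
-- SPLIT_PATTERN_2 = "Standard orientation:"
--
-- def _split_section_frames(section_content: str) -> list[str]:
--     split_ = SPLIT_PATTERN
--     if SPLIT_PATTERN in section_content:
--         split_ = SPLIT_PATTERN
--     elif SPLIT_PATTERN_2 in section_content:
--         split_ = SPLIT_PATTERN_2
--     else:
--         return []
--     fragments = section_content.split(split_)
--     header = fragments[0]
--     frame_contents: list[str] = []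
--     for idx, fragment in enumerate(fragments[1:]):
--         frame_block = f"{split_}\n{fragment}"
--         if idx == 0 and header.strip():
--             frame_block = f"{header}{frame_block}"
--         frame_contents.append(frame_block)
--     return frame_contents
-- ===== SOURCE B (Python) =====
-- SPLIT_PATTERN = "Input orientation:"
--
-- SPLIT_PATTERN_2 = "Standard orientation:"
--
-- def _split_section_frames(section_content: str) -> list[str]:
--     if SPLIT_PATTERN in section_content:
--         pat = SPLIT_PATTERN
--     elif SPLIT_PATTERN_2 in section_content:
--         pat = SPLIT_PATTERN_2
--     else:
--         return []
--     # Scan BACKWARD from the end of the string with rfind, emitting the frames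
--     # back-to-front; `end` shrinks to the start of the earliest occurrence, so
--     # what is left before it is the header.
--     frames = []
--     end = len(section_content)
--     while True:
--         j = section_content.rfind(pat, 0, end)
--         if j == -1:
--             break
--         frames.append(pat + "\n" + section_content[j + len(pat):end])
--         end = j
--     frames.reverse()
--     header = section_content[:end]
--     if header.strip():
--         frames[0] = header + frames[0]
--     return frames
-- ===== Notes on version B (the rewrite author's own statement) =====
-- stated objective: alternative
-- what changed: B scans the string BACKWARD with repeated str.rfind(pat, 0, end), emitting the frames back-to-front into a list that is reversed at the end (the shrinking `end` bound leaves the header before the earliest occurrence), instead of A's forward split()+enumerate loop with an in-loop idx==0 header special case; correct because the patterns have no self-overlap, so backward and forward occurrence scans cut at the same positions.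
import Mathlib
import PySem

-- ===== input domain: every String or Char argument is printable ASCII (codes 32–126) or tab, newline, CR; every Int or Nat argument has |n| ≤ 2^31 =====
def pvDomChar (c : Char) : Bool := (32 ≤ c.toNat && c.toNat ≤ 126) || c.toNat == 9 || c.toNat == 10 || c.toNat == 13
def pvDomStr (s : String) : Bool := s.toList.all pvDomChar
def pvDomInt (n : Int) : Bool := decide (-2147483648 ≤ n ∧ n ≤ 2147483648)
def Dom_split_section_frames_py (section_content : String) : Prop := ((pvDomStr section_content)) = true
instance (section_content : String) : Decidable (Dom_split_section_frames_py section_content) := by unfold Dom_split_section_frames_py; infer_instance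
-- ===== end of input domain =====

-- B scans BACKWARD from the end of the string with str.rfind, emitting the frames
-- back-to-front (append + reverse), instead of A's forward split()+enumerate loop
-- with an in-loop idx==0 header case (objective: alternative).

def pvP1 : List Char := "Input orientation:".toList

def pvP2 : List Char := "Standard orientation:".toList

-- ===== PORT A =====  (works on List Char; PySem.Str functions are thin wrappers over these)

-- frame_block built in A's loop body: f"{split_}\n{fragment}", with the idx==0 header prepend
def pvFrameA (sp header : List Char) (p : Int × List Char) : List Char :=
  let fb := sp ++ '\n' :: p.2
  if p.1 = 0 ∧ PySem.Chars.strip header ≠ [] then header ++ fb else fb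

-- body of A after split_ has been chosen (fragments = section_content.split(split_); the loop)
def pvACore (c sp : List Char) : List (List Char) :=
  match PySem.Chars.split? c sp with
  | none => []            -- unreachable: sp is a nonempty literal
  | some [] => []         -- unreachable: str.split never returns an empty list
  | some (header :: tail) =>
      (PySem.List.enumerate tail 0).foldl (fun acc p => acc ++ [pvFrameA sp header p]) []

def pvAChars (c : List Char) : List (List Char) :=
  if PySem.Chars.isIn pvP1 c then pvACore c pvP1
  else if PySem.Chars.isIn pvP2 c then pvACore c pvP2
  else []

def split_section_frames_py (section_content : String) : List String :=
  (pvAChars section_content.toList).map String.ofList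

-- ===== PORT B =====

-- Spec of str.rfind used only to justify termination of B's backward loop
-- (rfind.go s sub m scans positions m, m-1, …, 0 for the rightmost prefix match).
theorem pvRfindGo_spec (s sub : List Char) : ∀ m : Nat,
    (PySem.Chars.rfind.go s sub m = -1 ∧ ∀ i ≤ m, ¬ sub <+: s.drop i)
  ∨ (∃ j : Nat, PySem.Chars.rfind.go s sub m = (j : Int) ∧ j ≤ m ∧ sub <+: s.drop j
       ∧ ∀ i, j < i → i ≤ m → ¬ sub <+: s.drop i) := by
  intro m
  induction m with
  | zero =>
    by_cases h : sub.isPrefixOf s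
    · right
      refine ⟨0, ?_, le_refl 0, by simpa using List.isPrefixOf_iff_prefix.mp h, by omega⟩
      simp [PySem.Chars.rfind.go, h]
    · left
      constructor
      · simp [PySem.Chars.rfind.go, h]
      · intro i hi
        interval_cases i
        simpa using fun hp => h (List.isPrefixOf_iff_prefix.mpr hp)
  | succ m ih =>
    by_cases h : sub.isPrefixOf (s.drop (m + 1))
    · right
      refine ⟨m + 1, ?_, le_refl _, List.isPrefixOf_iff_prefix.mp h, by omega⟩
      rw [PySem.Chars.rfind.go]
      simp [h]
    · have hgo : PySem.Chars.rfind.go s sub (m + 1) = PySem.Chars.rfind.go s sub m := by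
        rw [PySem.Chars.rfind.go]
        simp [h]
      have hnot : ¬ sub <+: s.drop (m + 1) := fun hp => h (List.isPrefixOf_iff_prefix.mpr hp)
      rcases ih with ⟨h1, h2⟩ | ⟨j, hj, hjm, hocc, hmax⟩
      · left
        refine ⟨hgo.trans h1, fun i hi => ?_⟩
        rcases Nat.lt_or_ge i (m + 1) with hlt | hge
        · exact h2 i (by omega)
        · have : i = m + 1 := by omega
          exact this ▸ hnot
      · right
        refine ⟨j, hgo.trans hj, by omega, hocc, fun i hji hi => ?_⟩
        rcases Nat.lt_or_ge i (m + 1) with hlt | hge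
        · exact hmax i hji (by omega)
        · have : i = m + 1 := by omega
          exact this ▸ hnot

theorem pvRfind_spec (s sub : List Char) (hs : sub ≠ []) :
    (PySem.Chars.rfind s sub = -1 ∧ ∀ i, ¬ sub <+: s.drop i)
  ∨ (∃ j : Nat, PySem.Chars.rfind s sub = (j : Int) ∧ sub <+: s.drop j
       ∧ j + sub.length ≤ s.length ∧ ∀ i, j < i → ¬ sub <+: s.drop i) := by
  have hbig : ∀ i, s.length < i → ¬ sub <+: s.drop i := by
    intro i hi hp
    rw [List.drop_eq_nil_of_le (by omega)] at hp
    exact hs (List.prefix_nil.mp hp)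
  rcases pvRfindGo_spec s sub s.length with ⟨h1, h2⟩ | ⟨j, hj, hjm, hocc, hmax⟩
  · left
    refine ⟨h1, fun i => ?_⟩
    rcases Nat.lt_or_ge s.length i with hlt | hge
    · exact hbig i hlt
    · exact h2 i hge
  · right
    have hlen : sub.length ≤ (s.drop j).length := hocc.length_le
    rw [List.length_drop] at hlen
    refine ⟨j, hj, hocc, by omega, fun i hji => ?_⟩
    rcases Nat.lt_or_ge s.length i with hlt | hge
    · exact hbig i hlt
    · exact hmax i hji hge

-- s.rfind(sub, 0, e) for a natural bound e is rfind on the prefix s[:e] — exact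
theorem pvRfindFrom_eq_rfind (c pat : List Char) (e : Nat) :
    PySem.Chars.rfindFrom c pat 0 (some (e : Int)) = PySem.Chars.rfind (c.take e) pat := by
  unfold PySem.Chars.rfindFrom
  rcases Nat.lt_or_ge c.length e with hlt | hge
  · have h1 : ((c.length:Int) < (e:Int)) := by exact_mod_cast hlt
    simp only [h1, if_true, if_neg (show ¬ ((0:Int) < 0) by omega),
      if_neg (show ¬ ((c.length:Int) < 0) by omega), Int.toNat_zero, List.drop_zero,
      Int.toNat_natCast, List.take_length, zero_add]
    rw [List.take_of_length_le (by omega)]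
    split <;> omega
  · have h1 : ¬ ((c.length:Int) < (e:Int)) := by exact_mod_cast Nat.not_lt.mpr hge
    simp only [h1, if_false, if_neg (show ¬ ((0:Int) < 0) by omega),
      if_neg (show ¬ ((e:Int) < 0) by omega), Int.toNat_zero, List.drop_zero,
      Int.toNat_natCast, zero_add]
    split <;> omega

-- termination measure for B's loop: a found occurrence starts strictly before `e`
theorem pvRfindFrom_lt (c pat : List Char) (hp : pat ≠ []) (e : Nat)
    (h : ¬ PySem.Chars.rfindFrom c pat 0 (some (e : Int)) = -1) :
    (PySem.Chars.rfindFrom c pat 0 (some (e : Int))).toNat < e := by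
  rw [pvRfindFrom_eq_rfind] at h ⊢
  rcases pvRfind_spec (c.take e) pat hp with ⟨h1, _⟩ | ⟨j, hj, _, hle, _⟩
  · exact absurd h1 h
  · have hlen : (c.take e).length ≤ e := by simp
    have hplen : 0 < pat.length := List.length_pos_iff.mpr hp
    rw [hj]
    simp only [Int.toNat_natCast]
    omega

-- B's while loop: j = section_content.rfind(pat, 0, end); emit pat+"\n"+content[j+len(pat):end]
-- (indices nonnegative, so the slice is take/drop — exact) and continue with end = j;
-- returns the collected frames (in reverse order) together with the final `end`.
def pvBLoop (c pat : List Char) (hp : pat ≠ []) (e : Nat) (acc : List (List Char)) :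
    List (List Char) × Nat :=
  if _h : PySem.Chars.rfindFrom c pat 0 (some (e : Int)) = -1 then (acc, e)
  else
    pvBLoop c pat hp (PySem.Chars.rfindFrom c pat 0 (some (e : Int))).toNat
      (acc ++ [pat ++ '\n' ::
        ((c.take e).drop ((PySem.Chars.rfindFrom c pat 0 (some (e : Int))).toNat + pat.length))])
termination_by e
decreasing_by exact pvRfindFrom_lt c pat hp e _h

-- body of B after pat has been chosen: the backward loop from end = len(content),
-- frames.reverse(), header = content[:end], then the header prepend on frames[0]
def pvBCore (c pat : List Char) (hp : pat ≠ []) : List (List Char) :=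
  let r := pvBLoop c pat hp c.length []
  let frames := r.1.reverse
  let header := c.take r.2
  if PySem.Chars.strip header ≠ [] then
    match frames with
    | [] => []            -- unreachable: pat occurs in c, so the loop emits at least one frame
    | f0 :: fr => (header ++ f0) :: fr
  else frames

def pvBChars (c : List Char) : List (List Char) :=
  if PySem.Chars.isIn pvP1 c then pvBCore c pvP1 (by decide)
  else if PySem.Chars.isIn pvP2 c then pvBCore c pvP2 (by decide)
  else []

def split_section_frames_py_alt (section_content : String) : List String :=
  (pvBChars section_content.toList).map String.ofList

-- ===== PRECONDITION & SPEC =====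
def Spec_split_section_frames_py (section_content : String) (out : List String) : Prop := out = split_section_frames_py_alt section_content
instance (section_content : String) (out : List String) : Decidable (Spec_split_section_frames_py section_content out) := by unfold Spec_split_section_frames_py; infer_instance

-- ===== CLAIM (what is proved, stated in full; the proofs are below) =====
def Claim_equal_split_section_frames_py : Prop := ∀ (section_content : String), Dom_split_section_frames_py section_content → Spec_split_section_frames_py section_content (split_section_frames_py section_content)

-- ===== LEMMAS AND PROOFS =====

-- apply f to the head fragment only
def pvMapHead (f : List Char → List Char) : List (List Char) → List (List Char)
  | [] => []
  | x :: xs => f x :: xs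

-- clean recursive description of str.split's fragment list (sep nonempty)
def pvFrags (sep : List Char) (hs : sep ≠ []) (l : List Char) : List (List Char) :=
  match l with
  | [] => [[]]
  | c :: rest =>
    if sep.isPrefixOf (c :: rest) then
      [] :: pvFrags sep hs (List.drop sep.length (c :: rest))
    else
      pvMapHead (c :: ·) (pvFrags sep hs rest)
termination_by l.length
decreasing_by
  · have hp1 : 0 < sep.length := List.length_pos_iff.mpr hs
    simp only [List.length_drop, List.length_cons]
    omega
  · simp

theorem pvMapHead_id (l : List (List Char)) : pvMapHead (fun x => x) l = l := by
  cases l <;> simp [pvMapHead]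

theorem pvMapHead_comp (f g : List Char → List Char) (l : List (List Char)) :
    pvMapHead f (pvMapHead g l) = pvMapHead (fun x => f (g x)) l := by
  cases l <;> simp [pvMapHead]

theorem pvGo_eq (sep : List Char) (hs : sep ≠ []) :
    ∀ n l cur acc, l.length < n →
      PySem.Chars.splitOn.go sep n l cur acc
        = acc.reverse ++ pvMapHead (cur.reverse ++ ·) (pvFrags sep hs l) := by
  intro n
  induction n with
  | zero => intro l cur acc h; omega
  | succ n ih =>
    intro l cur acc h
    cases l with
    | nil =>
      rw [PySem.Chars.splitOn.go]
      simp [pvFrags, pvMapHead]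
      omega
    | cons c rest =>
      rw [PySem.Chars.splitOn.go]
      by_cases hpre : sep.isPrefixOf (c :: rest)
      · have hp1 : 0 < sep.length := List.length_pos_iff.mpr hs
        rw [if_pos hpre]
        rw [ih _ _ _ (by simp only [List.length_drop, List.length_cons] at *; omega)]
        rw [pvFrags, if_pos hpre]
        simp [pvMapHead, List.append_assoc]
        cases pvFrags sep hs (List.drop sep.length (c :: rest)) <;> rfl
      · rw [if_neg hpre]
        rw [ih _ _ _ (by simp at h ⊢; omega)]
        rw [pvFrags, if_neg hpre]
        rw [pvMapHead_comp]
        congr 1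
        cases pvFrags sep hs rest <;> simp [pvMapHead]

theorem pvSplitOn_eq_frags (sep : List Char) (hs : sep ≠ []) (s : List Char) :
    PySem.Chars.splitOn s sep = pvFrags sep hs s := by
  unfold PySem.Chars.splitOn
  rw [pvGo_eq sep hs _ _ _ _ (by omega)]
  simp [pvMapHead_id]

theorem pvFrags_of_not_infix (sep : List Char) (hs : sep ≠ []) :
    ∀ l, ¬ sep <:+: l → pvFrags sep hs l = [l] := by
  intro l
  induction l with
  | nil => intro _; rw [pvFrags]
  | cons c rest ih =>
    intro hni
    rw [pvFrags]
    have hpre : ¬ sep.isPrefixOf (c :: rest) := by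
      intro hp
      exact hni (List.IsPrefix.isInfix (List.isPrefixOf_iff_prefix.mp hp))
    rw [if_neg hpre]
    rw [ih (fun hmem => hni (List.infix_cons hmem))]
    simp [pvMapHead]

theorem pvFrags_first_occ (sep : List Char) (hs : sep ≠ []) :
    ∀ j l, sep <+: l.drop j → (∀ i < j, ¬ sep <+: l.drop i) →
      pvFrags sep hs l = l.take j :: pvFrags sep hs (l.drop (j + sep.length)) := by
  intro j
  induction j with
  | zero =>
    intro l hocc _
    simp only [List.drop_zero] at hocc
    cases l with
    | nil =>
      exact absurd (List.prefix_nil.mp hocc) hs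
    | cons c rest =>
      rw [pvFrags, if_pos (List.isPrefixOf_iff_prefix.mpr hocc)]
      simp
  | succ j ih =>
    intro l hocc hmin
    cases l with
    | nil => simp at hocc; exact absurd hocc hs
    | cons c rest =>
      have h0 : ¬ sep <+: (c :: rest) := by
        have := hmin 0 (by omega); simpa using this
      have hpre : ¬ sep.isPrefixOf (c :: rest) := fun hp =>
        h0 (List.isPrefixOf_iff_prefix.mp hp)
      rw [pvFrags, if_neg hpre]
      have hocc' : sep <+: rest.drop j := by simpa using hocc
      have hmin' : ∀ i < j, ¬ sep <+: rest.drop i := by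
        intro i hi
        have := hmin (i + 1) (by omega)
        simpa using this
      rw [ih rest hocc' hmin']
      have hdrop : (c :: rest).drop (j + 1 + sep.length) = rest.drop (j + sep.length) := by
        have : j + 1 + sep.length = (j + sep.length) + 1 := by omega
        rw [this, List.drop_succ_cons]
      rw [hdrop]
      simp [pvMapHead]

-- A's enumerate loop, for start ≥ 1: the idx == 0 branch never fires
theorem pvEnumMap_pos (sp header : List Char) :
    ∀ (tail : List (List Char)) (k : Int), 1 ≤ k →
      (PySem.List.enumerate tail k).map (pvFrameA sp header)
        = tail.map (fun fr => sp ++ '\n' :: fr) := by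
  intro tail
  induction tail with
  | nil => intro k _; simp [PySem.List.enumerate]
  | cons t tr ih =>
    intro k hk
    rw [PySem.List.enumerate]
    simp only [List.map_cons]
    rw [ih (k + 1) (by omega)]
    have : pvFrameA sp header (k, t) = sp ++ '\n' :: t := by
      simp [pvFrameA]
      intro h; omega
    rw [this]

theorem pvEnumMap (sp header : List Char) (tail : List (List Char)) :
    (PySem.List.enumerate tail 0).map (pvFrameA sp header)
      = if PySem.Chars.strip header ≠ [] then
          pvMapHead (header ++ ·) (tail.map (fun fr => sp ++ '\n' :: fr))
        else tail.map (fun fr => sp ++ '\n' :: fr) := by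
  cases tail with
  | nil => simp [PySem.List.enumerate, pvMapHead]
  | cons t tr =>
    rw [PySem.List.enumerate]
    simp only [List.map_cons]
    rw [pvEnumMap_pos sp header tr (0 + 1) (by omega)]
    by_cases hstrip : PySem.Chars.strip header ≠ []
    · rw [if_pos hstrip]
      simp [pvFrameA, pvMapHead, hstrip]
    · rw [if_neg hstrip]
      simp [pvFrameA, hstrip]

-- A's result, expressed through pvFrags (header = first fragment, one frame per later fragment)
theorem pvACore_char (c sp : List Char) (hp : sp ≠ []) (hin : PySem.Chars.isIn sp c = true) :
    pvACore c sp =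
      if PySem.Chars.strip (pvFrags sp hp c).headI ≠ [] then
        pvMapHead ((pvFrags sp hp c).headI ++ ·)
          ((pvFrags sp hp c).tail.map (fun fr => sp ++ '\n' :: fr))
      else (pvFrags sp hp c).tail.map (fun fr => sp ++ '\n' :: fr) := by
  have hemp : sp.isEmpty = false := by
    cases sp with
    | nil => exact absurd rfl hp
    | cons a l => rfl
  have hsplit : PySem.Chars.split? c sp = some (pvFrags sp hp c) := by
    rw [PySem.Chars.split?, hemp]
    simp [pvSplitOn_eq_frags sp hp c]
  cases hfs : pvFrags sp hp c with
  | nil =>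
    have hinf : sp <:+: c := (PySem.Chars.isIn_iff_infix sp c).mp hin
    have hj : 0 ≤ PySem.Chars.find c sp := (PySem.Chars.find_nonneg_iff c sp).mpr hinf
    obtain ⟨hocc, hmin⟩ := PySem.Chars.find_spec hj
    have := pvFrags_first_occ sp hp _ c hocc hmin
    rw [hfs] at this
    exact absurd this (by simp)
  | cons header tail =>
    simp only [pvACore, hsplit, hfs]
    rw [PySem.List.foldl_append_singleton_eq_map, List.nil_append, pvEnumMap]
    simp

-- ===== no-self-overlap of the pattern, and splitting pvFrags at the LAST occurrence =====

-- the split patterns have no nontrivial border, so occurrences never overlap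
def pvNoBorder (pat : List Char) : Prop :=
  ∀ i ∈ List.range pat.length, i = 0 ∨ ¬ pat.drop i <+: pat

theorem pvNoOverlap (pat : List Char) (hnb : pvNoBorder pat) (s : List Char)
    (h0 : pat <+: s) : ∀ i, 0 < i → i < pat.length → ¬ pat <+: s.drop i := by
  intro i hi hilen hp
  obtain ⟨t, rfl⟩ := h0
  rw [List.drop_append_of_le_length (by omega)] at hp
  have hpre : pat.drop i <+: pat.drop i ++ t := List.prefix_append _ _
  have : pat.drop i <+: pat :=
    List.prefix_of_prefix_length_le hpre hp (by simp)
  rcases hnb i (List.mem_range.mpr hilen) with h | h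
  · omega
  · exact h this

theorem pvFrags_ne_nil (sep : List Char) (hs : sep ≠ []) (l : List Char) :
    pvFrags sep hs l ≠ [] := by
  induction l with
  | nil => rw [pvFrags]; simp
  | cons c rest ih =>
    rw [pvFrags]
    split
    · simp
    · cases h : pvFrags sep hs rest with
      | nil => exact absurd h ih
      | cons x xs => simp [pvMapHead]

theorem pvMapHead_append (f : List Char → List Char) (xs ys : List (List Char)) (h : xs ≠ []) :
    pvMapHead f (xs ++ ys) = pvMapHead f xs ++ ys := by
  cases xs with
  | nil => exact absurd rfl h
  | cons x xr => simp [pvMapHead]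

-- helper equations for pvFrags
theorem pvFrags_eq_pos (sep : List Char) (hs : sep ≠ []) (l : List Char)
    (h : sep.isPrefixOf l) :
    pvFrags sep hs l = [] :: pvFrags sep hs (l.drop sep.length) := by
  cases l with
  | nil =>
    exact absurd (List.prefix_nil.mp (List.isPrefixOf_iff_prefix.mp h)) hs
  | cons c rest => rw [pvFrags, if_pos h]

theorem pvFrags_eq_neg (sep : List Char) (hs : sep ≠ []) (c : Char) (rest : List Char)
    (h : ¬ sep.isPrefixOf (c :: rest)) :
    pvFrags sep hs (c :: rest) = pvMapHead (c :: ·) (pvFrags sep hs rest) := by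
  rw [pvFrags, if_neg h]

-- no occurrence at any position means the pattern is not an infix
theorem pvNotInfix_of_no_occ (sub s : List Char) (h : ∀ i, ¬ sub <+: s.drop i) :
    ¬ sub <:+: s := by
  intro hinf
  obtain ⟨j, hj⟩ := (PySem.Chars.exists_prefix_drop_iff_isIn sub s).mpr
    ((PySem.Chars.isIn_iff_infix sub s).mpr hinf)
  exact h j hj

-- pvFrags splits off the fragment after the LAST occurrence (patterns without self-overlap)
theorem pvFrags_last_occ (pat : List Char) (hp : pat ≠ []) (hnb : pvNoBorder pat) :
    ∀ (n : Nat) (c : List Char), c.length ≤ n → ∀ (j : Nat), pat <+: c.drop j →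
      (∀ i, j < i → ¬ pat <+: c.drop i) →
      pvFrags pat hp c = pvFrags pat hp (c.take j) ++ [c.drop (j + pat.length)] := by
  intro n
  induction n with
  | zero =>
    intro c hc j hocc _
    have hcnil : c = [] := List.eq_nil_of_length_eq_zero (by omega)
    subst hcnil
    simp only [List.drop_nil] at hocc
    exact absurd (List.prefix_nil.mp hocc) hp
  | succ n ih =>
    intro c hc j hocc hmax
    have hplen : 0 < pat.length := List.length_pos_iff.mpr hp
    cases c with
    | nil =>
      simp only [List.drop_nil] at hocc
      exact absurd (List.prefix_nil.mp hocc) hp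
    | cons ch rest =>
      by_cases hpre : pat.isPrefixOf (ch :: rest)
      · have hpre' : pat <+: (ch :: rest) := List.isPrefixOf_iff_prefix.mp hpre
        rw [pvFrags_eq_pos pat hp _ hpre]
        by_cases hj : j = 0
        · subst hj
          have hni : ¬ pat <:+: (ch :: rest).drop pat.length := by
            apply pvNotInfix_of_no_occ
            intro i hpf
            have hdd : ((ch :: rest).drop pat.length).drop i = (ch :: rest).drop (pat.length + i) := by
              rw [List.drop_drop]
            rw [hdd] at hpf
            exact hmax (pat.length + i) (by omega) hpf
          rw [pvFrags_of_not_infix pat hp _ hni]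
          rw [List.take_zero, pvFrags]
          simp
        · have hjlen : pat.length ≤ j := by
            by_contra hlt
            exact pvNoOverlap pat hnb _ hpre' j (by omega) (by omega) hocc
          have hpretake : pat.isPrefixOf ((ch :: rest).take j) :=
            List.isPrefixOf_iff_prefix.mpr (List.prefix_take_iff.mpr ⟨hpre', hjlen⟩)
          rw [pvFrags_eq_pos pat hp _ hpretake]
          have hocc' : pat <+: ((ch :: rest).drop pat.length).drop (j - pat.length) := by
            have hdd : ((ch :: rest).drop pat.length).drop (j - pat.length)
                = (ch :: rest).drop j := by
              rw [List.drop_drop]; congr 1; omega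
            rw [hdd]; exact hocc
          have hmax' : ∀ i, j - pat.length < i → ¬ pat <+: ((ch :: rest).drop pat.length).drop i := by
            intro i hi hpf
            have hdd : ((ch :: rest).drop pat.length).drop i = (ch :: rest).drop (pat.length + i) := by
              rw [List.drop_drop]
            rw [hdd] at hpf
            exact hmax (pat.length + i) (by omega) hpf
          have ihres := ih ((ch :: rest).drop pat.length)
            (by simp only [List.length_drop, List.length_cons] at hc ⊢; omega)
            (j - pat.length) hocc' hmax'
          rw [ihres]
          have h1 : ((ch :: rest).take j).drop pat.length
              = ((ch :: rest).drop pat.length).take (j - pat.length) := List.drop_take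
          have h2 : ((ch :: rest).drop pat.length).drop (j - pat.length + pat.length)
              = (ch :: rest).drop (j + pat.length) := by
            rw [List.drop_drop]; congr 1; omega
          rw [h1, h2]
          simp
      · have hj0 : j ≠ 0 := by
          intro h0
          subst h0
          simp only [List.drop_zero] at hocc
          exact hpre (List.isPrefixOf_iff_prefix.mpr hocc)
        rw [pvFrags_eq_neg pat hp ch rest hpre]
        have hocc' : pat <+: rest.drop (j - 1) := by
          have : (ch :: rest).drop j = rest.drop (j - 1) := by
            conv_lhs => rw [show j = (j - 1) + 1 by omega]
            rw [List.drop_succ_cons]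
          rwa [this] at hocc
        have hmax' : ∀ i, j - 1 < i → ¬ pat <+: rest.drop i := by
          intro i hi hpf
          have : (ch :: rest).drop (i + 1) = rest.drop i := List.drop_succ_cons
          exact hmax (i + 1) (by omega) (this ▸ hpf)
        have ihres := ih rest (by simp only [List.length_cons] at hc; omega) (j - 1) hocc' hmax'
        have htak : (ch :: rest).take j = ch :: rest.take (j - 1) := by
          conv_lhs => rw [show j = (j - 1) + 1 by omega]
          rw [List.take_succ_cons]
        have hpretak : ¬ pat.isPrefixOf (ch :: rest.take (j - 1)) := by
          intro hpf
          rw [← htak] at hpf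
          have := (List.prefix_take_iff.mp (List.isPrefixOf_iff_prefix.mp hpf)).1
          exact hpre (List.isPrefixOf_iff_prefix.mpr this)
        rw [htak, pvFrags_eq_neg pat hp ch _ hpretak, ihres,
          pvMapHead_append _ _ _ (pvFrags_ne_nil pat hp _)]
        have hdr : (ch :: rest).drop (j + pat.length) = rest.drop (j - 1 + pat.length) := by
          conv_lhs => rw [show j + pat.length = (j - 1 + pat.length) + 1 by omega]
          rw [List.drop_succ_cons]
        rw [hdr]

-- backward-loop invariant: pvBLoop collects (reversed) the frames of c[:e]
theorem pvBLoop_spec (c pat : List Char) (hp : pat ≠ []) (hnb : pvNoBorder pat) :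
    ∀ (e : Nat), e ≤ c.length → ∀ (acc : List (List Char)),
      pvBLoop c pat hp e acc =
        (acc ++ ((pvFrags pat hp (c.take e)).tail.map (fun fr => pat ++ '\n' :: fr)).reverse,
         (pvFrags pat hp (c.take e)).headI.length) := by
  intro e
  induction e using Nat.strong_induction_on with
  | _ e ih =>
    intro he acc
    rw [pvBLoop]
    have hlen : (c.take e).length = e := by simp; omega
    by_cases h : PySem.Chars.rfindFrom c pat 0 (some (e : Int)) = -1
    · rw [dif_pos h]
      rw [pvRfindFrom_eq_rfind] at h
      rcases pvRfind_spec (c.take e) pat hp with ⟨_, hno⟩ | ⟨j, hj, _, _, _⟩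
      · rw [pvFrags_of_not_infix pat hp _ (pvNotInfix_of_no_occ pat _ hno)]
        simp [hlen]
      · rw [hj] at h; omega
    · rw [dif_neg h]
      have hval := pvRfindFrom_eq_rfind c pat e
      rcases pvRfind_spec (c.take e) pat hp with ⟨h1, _⟩ | ⟨j, hj, hocc, hfit, hmax⟩
      · exact absurd (hval.trans h1) h
      · rw [hj] at hval
        rw [hval]
        simp only [Int.toNat_natCast]
        have hje : j + pat.length ≤ e := by rw [hlen] at hfit; exact hfit
        have hplen : 0 < pat.length := List.length_pos_iff.mpr hp
        rw [ih j (by omega) (by omega)]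
        have hsplit := pvFrags_last_occ pat hp hnb (c.take e).length (c.take e)
          (le_refl _) j hocc hmax
        have htt : (c.take e).take j = c.take j := by
          rw [List.take_take]; congr 1; omega
        rw [htt] at hsplit
        rw [hsplit]
        cases hA : pvFrags pat hp (c.take j) with
        | nil => exact absurd hA (pvFrags_ne_nil pat hp _)
        | cons a as =>
          simp [List.append_assoc]

theorem pvCore_eq (c sp : List Char) (hp : sp ≠ []) (hnb : pvNoBorder sp)
    (hin : PySem.Chars.isIn sp c = true) :
    pvACore c sp = pvBCore c sp hp := by
  rw [pvACore_char c sp hp hin]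
  have hinf : sp <:+: c := (PySem.Chars.isIn_iff_infix sp c).mp hin
  have hfind : 0 ≤ PySem.Chars.find c sp := (PySem.Chars.find_nonneg_iff c sp).mpr hinf
  obtain ⟨hocc, hmin⟩ := PySem.Chars.find_spec hfind
  have hfirst := pvFrags_first_occ sp hp _ c hocc hmin
  have hj0len : (PySem.Chars.find c sp).toNat ≤ c.length := by
    have := PySem.Chars.find_le_length c sp
    omega
  have hheadI : (pvFrags sp hp c).headI = c.take (PySem.Chars.find c sp).toNat := by
    rw [hfirst]; rfl
  have hheader : c.take ((pvFrags sp hp c).headI.length) = (pvFrags sp hp c).headI := by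
    rw [hheadI, List.length_take]
    congr 1
    omega
  simp only [pvBCore]
  rw [pvBLoop_spec c sp hp hnb c.length (le_refl _) [], List.take_length]
  simp only [List.nil_append, List.reverse_reverse, hheader]
  by_cases hstrip : PySem.Chars.strip (pvFrags sp hp c).headI ≠ []
  · rw [if_pos hstrip, if_pos hstrip]
    cases (pvFrags sp hp c).tail.map (fun fr => sp ++ '\n' :: fr) with
    | nil => simp [pvMapHead]
    | cons f0 fr => simp [pvMapHead]
  · rw [if_neg hstrip, if_neg hstrip]

theorem pvChars_eq (c : List Char) : pvAChars c = pvBChars c := by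
  rw [pvAChars, pvBChars]
  by_cases h1 : PySem.Chars.isIn pvP1 c
  · rw [if_pos h1, if_pos h1]
    exact pvCore_eq c pvP1 (by decide) (by unfold pvNoBorder; decide) h1
  · rw [if_neg h1, if_neg h1]
    by_cases h2 : PySem.Chars.isIn pvP2 c
    · rw [if_pos h2, if_pos h2]
      exact pvCore_eq c pvP2 (by decide) (by unfold pvNoBorder; decide) h2
    · rw [if_neg h2, if_neg h2]

-- ===== VERDICT (by name: the statement is the Claim_ definition above) =====
theorem split_section_frames_py_spec : Claim_equal_split_section_frames_py := by
  intro s _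
  unfold Spec_split_section_frames_py split_section_frames_py split_section_frames_py_alt
  rw [pvChars_eq]
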